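-- pv_equiv track=rewrite | github.com/47mm/boolean_search_hw_framework | work_dir/hw_boolean_search.py | _is_brackets
-- ===== SOURCE A (Python) =====
-- def _is_brackets(q):
--     if q[0] != '(':
--         return False
--     brackets = 0
--     for c in q[1:-1]:
--         if c == '(':
--             brackets += 1
--         if c == ')':
--             brackets -= 1
--         if brackets < 0:
--             return False
--     return brackets == 0
-- ===== SOURCE B (Python) =====
-- def _is_brackets(q):
--     if q[0] != '(':
--         return False
--     prefixes = []
--     s = 0
--     for c in q[1:-1]:
--         s += (c == '(') - (c == ')')
--         prefixes.append(s)
--     if not prefixes: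
--         return True
--     return min(prefixes) >= 0 and prefixes[-1] == 0
-- ===== Notes on version B (the rewrite author's own statement) =====
-- stated objective: alternative
-- what changed: Replaced A's single-pass early-exit running counter by a two-phase table approach: build the full prefix-sum list of bracket deltas over q[1:-1], then validate with aggregate checks min(prefixes) >= 0 and prefixes[-1] == 0 (empty interior is True).
import Mathlib
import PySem

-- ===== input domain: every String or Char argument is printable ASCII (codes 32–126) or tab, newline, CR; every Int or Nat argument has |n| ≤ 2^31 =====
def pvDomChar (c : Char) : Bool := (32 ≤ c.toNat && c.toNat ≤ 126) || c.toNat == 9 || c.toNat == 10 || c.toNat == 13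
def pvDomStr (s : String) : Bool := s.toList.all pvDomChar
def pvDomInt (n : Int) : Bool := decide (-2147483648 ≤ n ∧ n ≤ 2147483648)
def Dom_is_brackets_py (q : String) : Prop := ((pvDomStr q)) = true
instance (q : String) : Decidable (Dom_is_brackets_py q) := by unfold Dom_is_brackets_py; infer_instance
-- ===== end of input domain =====

-- B replaces A's early-exit running-counter scan by building the full prefix-sum table of
-- bracket deltas and validating it with aggregate checks (min ≥ 0 and last = 0): alternative decomposition.


-- ===== PORT A =====
-- A's for-loop over q[1:-1] with the running counter 'brackets' and the early 'return False'
def pvALoop : List Char → Int → Bool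
  | [], brackets => brackets == 0
  | c :: rest, brackets =>
    let brackets := if c = '(' then brackets + 1 else brackets
    let brackets := if c = ')' then brackets - 1 else brackets
    if brackets < 0 then false else pvALoop rest brackets

def is_brackets_py (q : String) : Bool :=
  match q.toList with
  | [] => false  -- unreachable under Pre_: Python A raises IndexError on q = ""
  | c0 :: _ =>
    if c0 ≠ '(' then false
    else pvALoop (PySem.List.slice q.toList (some 1) (some (-1))) 0

-- ===== PORT B =====
-- B's table-building loop: the list of prefix sums of the deltas over q[1:-1]
def pvBPrefixes : List Char → Int → List Int
  | [], _ => []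
  | c :: rest, s =>
    let s := s + (if c = '(' then 1 else 0) - (if c = ')' then 1 else 0)
    s :: pvBPrefixes rest s

def is_brackets_py_alt (q : String) : Bool :=
  match q.toList with
  | [] => false  -- unreachable under Pre_: Python B raises IndexError on q = ""
  | c0 :: _ =>
    if c0 ≠ '(' then false
    else
      let ps := pvBPrefixes (PySem.List.slice q.toList (some 1) (some (-1))) 0
      if ps = [] then true
      else decide (0 ≤ (PySem.List.min? ps (fun x => x)).getD 0) && (ps.getLastD 0 == 0)

-- ===== PRECONDITION & SPEC =====
-- Pre_ excludes only the empty string, on which A (q[0]) raises IndexError.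
def Pre_is_brackets_py (q : String) : Prop := q ≠ ""
instance (q : String) : Decidable (Pre_is_brackets_py q) := by unfold Pre_is_brackets_py; infer_instance
def pvWitness_is_brackets_py : String := "(a)"

def Spec_is_brackets_py (q : String) (out : Bool) : Prop := out = is_brackets_py_alt q
instance (q : String) (out : Bool) : Decidable (Spec_is_brackets_py q out) := by unfold Spec_is_brackets_py; infer_instance

-- ===== CLAIM (what is proved, stated in full; the proofs are below) =====
def Claim_equal_is_brackets_py : Prop := ∀ (q : String), Dom_is_brackets_py q → Pre_is_brackets_py q → Spec_is_brackets_py q (is_brackets_py q)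

-- ===== LEMMAS AND PROOFS =====

-- A's early-exit counter scan equals "all prefixes ≥ 0 and the last prefix (default: the start value) is 0".
theorem pvALoop_eq_prefixes (l : List Char) (s : Int) :
    pvALoop l s = ((pvBPrefixes l s).all (fun x => decide (0 ≤ x)) && ((pvBPrefixes l s).getLastD s == 0)) := by
  induction l generalizing s with
  | nil => simp [pvALoop, pvBPrefixes]
  | cons c rest ih =>
    simp only [pvALoop, pvBPrefixes]
    have hstep : (s + (if c = '(' then (1:Int) else 0) - (if c = ')' then 1 else 0))
        = (if c = ')' then (if c = '(' then s + 1 else s) - 1 else (if c = '(' then s + 1 else s)) := by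
      rcases eq_or_ne c '(' with h1 | h1 <;> rcases eq_or_ne c ')' with h2 | h2 <;> simp_all
    rw [hstep]
    set t := (if c = ')' then (if c = '(' then s + 1 else s) - 1 else (if c = '(' then s + 1 else s)) with ht
    rw [List.getLastD_cons]
    by_cases hneg : t < 0
    · rw [if_pos hneg]
      simp [show ¬ (0 ≤ t) by omega]
    · rw [if_neg hneg, ih]
      simp [show (0 ≤ t) by omega]

theorem foldl_min_nonneg (t : List Int) (x : Int) :
    (0 ≤ t.foldl min x) ↔ (0 ≤ x ∧ ∀ y ∈ t, 0 ≤ y) := by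
  induction t generalizing x with
  | nil => simp
  | cons a t ih =>
    simp only [List.foldl_cons, ih, List.mem_cons]
    constructor
    · rintro ⟨h1, h2⟩
      refine ⟨by simp [min_def] at h1; omega, ?_⟩
      rintro y (rfl | hy)
      · simp [min_def] at h1; omega
      · exact h2 y hy
    · rintro ⟨hx, hall⟩
      exact ⟨le_min hx (hall a (Or.inl rfl)), fun y hy => hall y (Or.inr hy)⟩

-- On a nonempty list, "the minimum is ≥ 0" is "all elements are ≥ 0".
theorem min_nonneg_eq_all (ps : List Int) (h : ps ≠ []) :
    decide (0 ≤ (PySem.List.min? ps (fun x => x)).getD 0) = ps.all (fun x => decide (0 ≤ x)) := by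
  cases ps with
  | nil => exact absurd rfl h
  | cons x t =>
    rw [PySem.List.min?_id_cons]
    simp only [Option.getD_some, List.all_cons]
    rw [Bool.eq_iff_iff]
    simp [foldl_min_nonneg, List.all_eq_true]

theorem getLastD_indep (ps : List Int) (h : ps ≠ []) (a b : Int) :
    ps.getLastD a = ps.getLastD b := by
  cases ps with
  | nil => exact absurd rfl h
  | cons x t => induction t generalizing x with
    | nil => rfl
    | cons y t ih => exact ih y (by simp)

-- ===== VERDICT (by name: the statement is the Claim_ definition above) =====
theorem is_brackets_py_spec : Claim_equal_is_brackets_py := by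
  intro q _ _
  unfold Spec_is_brackets_py is_brackets_py is_brackets_py_alt
  cases hq : q.toList with
  | nil => rfl
  | cons c0 rest =>
    by_cases hc : c0 ≠ '('
    · simp [hc]
    · simp only [if_neg hc]
      rw [pvALoop_eq_prefixes]
      by_cases hps : pvBPrefixes (PySem.List.slice (c0 :: rest) (some 1) (some (-1))) 0 = []
      · rw [if_pos hps, hps]
        simp
      · rw [if_neg hps, min_nonneg_eq_all _ hps, getLastD_indep _ hps 0 0]
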